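-- pv_equiv track=rewrite | github.com/shuvo-99/CodeForces-ProblemSet-Solution | 4A.py | evenDivide
-- ===== SOURCE A (Python) =====
-- def evenDivide(inp):
--     if inp < 4 or inp % 2 != 0:
--         return "NO"
--     else:
--         for i in range(2, inp, 2):
--             if (inp - i) % 2 == 0:
--                 return "YES"
--     return "NO"
-- ===== SOURCE B (Python) =====
-- def evenDivide(inp):
--     return "YES" if inp >= 4 and inp % 2 == 0 else "NO"
-- ===== Notes on version B (the rewrite author's own statement) =====
-- stated objective: simpler
-- what changed: Replaced A's loop over range(2, inp, 2) searching for an even addend with a single closed-form boolean test (inp >= 4 and even), eliminating the iteration entirely.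
import Mathlib
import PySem

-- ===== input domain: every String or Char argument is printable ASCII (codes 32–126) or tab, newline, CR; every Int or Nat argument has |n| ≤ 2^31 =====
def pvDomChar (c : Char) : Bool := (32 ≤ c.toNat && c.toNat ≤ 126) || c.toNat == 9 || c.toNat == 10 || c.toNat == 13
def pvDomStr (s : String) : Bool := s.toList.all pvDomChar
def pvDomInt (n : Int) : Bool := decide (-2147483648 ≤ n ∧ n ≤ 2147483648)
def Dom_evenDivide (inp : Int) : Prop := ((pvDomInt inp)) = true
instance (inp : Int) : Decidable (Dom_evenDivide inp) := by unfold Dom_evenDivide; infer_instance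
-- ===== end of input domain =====

-- B replaces A's loop over range(2, inp, 2) with a single closed-form test; same return values.
-- ===== PORT A =====
def evenDivideLoop (inp : Int) : List Int → String
  | [] => "NO"
  | i :: rest => if PySem.Int.mod (inp - i) 2 = 0 then "YES" else evenDivideLoop inp rest

def evenDivide (inp : Int) : String :=
  if inp < 4 ∨ PySem.Int.mod inp 2 ≠ 0 then "NO"
  else evenDivideLoop inp (PySem.List.pyRange 2 inp 2)

-- ===== PORT B =====
def evenDivide_alt (inp : Int) : String :=
  if inp ≥ 4 ∧ PySem.Int.mod inp 2 = 0 then "YES" else "NO"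

-- ===== PRECONDITION & SPEC =====
def Spec_evenDivide (inp : Int) (out : String) : Prop := out = evenDivide_alt inp
instance (inp : Int) (out : String) : Decidable (Spec_evenDivide inp out) := by unfold Spec_evenDivide; infer_instance

-- ===== CLAIM (what is proved, stated in full; the proofs are below) =====
def Claim_equal_evenDivide : Prop := ∀ (inp : Int), Dom_evenDivide inp → Spec_evenDivide inp (evenDivide inp)

-- ===== LEMMAS AND PROOFS =====

-- ===== VERDICT (by name: the statement is the Claim_ definition above) =====
theorem evenDivide_spec : Claim_equal_evenDivide := by
  intro inp _
  unfold Spec_evenDivide evenDivide evenDivide_alt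
  by_cases h : inp < 4 ∨ PySem.Int.mod inp 2 ≠ 0
  · rw [if_pos h, if_neg]
    rcases h with h | h
    · rintro ⟨h4, _⟩; omega
    · rintro ⟨_, h2⟩; exact h h2
  · push Not at h
    obtain ⟨h4, h2⟩ := h
    rw [if_neg (by push Not; exact ⟨h4, h2⟩), if_pos ⟨by omega, h2⟩]
    rcases hl : PySem.List.pyRange 2 inp 2 with _ | ⟨i, rest⟩
    · exfalso
      have : (2 : Int) ∈ PySem.List.pyRange 2 inp 2 := by
        rw [PySem.List.mem_pyRange_iff_of_pos (by norm_num)]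
        exact ⟨le_refl 2, by omega, by simp⟩
      rw [hl] at this; simp at this
    · have hi : i ∈ PySem.List.pyRange 2 inp 2 := by rw [hl]; exact List.mem_cons_self
      rw [PySem.List.mem_pyRange_iff_of_pos (by norm_num)] at hi
      obtain ⟨_, _, hdvd⟩ := hi
      unfold evenDivideLoop
      rw [if_pos]
      have h2' : inp % 2 = 0 := by
        have := h2
        rw [PySem.Int.mod, Int.fmod_eq_emod] at this
        simpa using this
      obtain ⟨k, hk⟩ := hdvd
      rw [PySem.Int.mod, Int.fmod_eq_emod]
      simp only [show ((0:Int) ≤ 2 ∨ 2 ∣ inp - i) = True by simp, if_true, add_zero]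
      omega
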